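-- pv_equiv track=rewrite | github.com/game-difficulty/2048EndgameTablebase | src/Config.py | fill_mid_falses
-- ===== SOURCE A (Python) =====
-- def fill_mid_falses(lst):
--     if len(lst) < 3:
--         return lst
--     result = lst.copy()
--     for i in range(1, len(lst) - 1):
--         if not lst[i] and lst[i - 1] and lst[i + 1]:
--             result[i] = True
--
--     return result
-- ===== SOURCE B (Python) =====
-- def fill_mid_falses(lst):
--     if len(lst) < 3:
--         return lst
--     trues = [i for i, x in enumerate(lst) if x]
--     result = lst.copy()
--     for a, b in zip(trues, trues[1:]):
--         if b - a == 2: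
--             result[a + 1] = True
--     return result
-- ===== Notes on version B (the rewrite author's own statement) =====
-- stated objective: alternative
-- what changed: Instead of scanning every interior index and testing both neighbors, B first collects the indices of truthy cells into a list and then walks consecutive pairs of that index list, setting the midpoint of every pair at distance exactly 2; the per-index neighbor test disappears.
import Mathlib
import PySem

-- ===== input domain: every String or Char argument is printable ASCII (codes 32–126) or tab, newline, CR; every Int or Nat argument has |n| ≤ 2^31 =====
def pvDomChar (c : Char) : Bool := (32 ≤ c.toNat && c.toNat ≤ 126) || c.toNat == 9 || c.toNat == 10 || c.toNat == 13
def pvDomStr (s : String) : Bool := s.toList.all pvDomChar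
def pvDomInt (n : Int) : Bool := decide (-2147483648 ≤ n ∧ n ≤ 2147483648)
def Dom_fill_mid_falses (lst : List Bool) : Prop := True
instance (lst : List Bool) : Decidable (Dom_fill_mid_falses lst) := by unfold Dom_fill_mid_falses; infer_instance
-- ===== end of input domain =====

-- B replaces A's per-index neighbor scan by two staged passes: collect the indices of
-- truthy cells, then set the midpoint of every consecutive index pair at distance 2
-- (objective: alternative, same O(n) cost).

-- ===== PORT A =====
-- range(1, len(lst)-1) = List.range' 1 (lst.length - 2); lst[i] with 0 ≤ i < len is lst.getD i false.
def fill_mid_falses (lst : List Bool) : List Bool :=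
  if lst.length < 3 then lst
  else
    (List.range' 1 (lst.length - 2)).foldl
      (fun result i =>
        if !(lst.getD i false) && lst.getD (i - 1) false && lst.getD (i + 1) false then
          result.set i true
        else result) lst

-- ===== PORT B =====
-- trues = [i for i, x in enumerate(lst) if x]: filter on PySem.List.enumerate, then map fst.
def pyTrues (lst : List Bool) : List Int :=
  ((PySem.List.enumerate lst).filter (fun p => p.2)).map (fun p => p.1)

-- trues[1:] = drop 1; result[a+1] = True with 0 ≤ a is result.set (a+1).toNat true.
def fill_mid_falses_alt (lst : List Bool) : List Bool :=
  if lst.length < 3 then lst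
  else
    ((pyTrues lst).zip ((pyTrues lst).drop 1)).foldl
      (fun result ab =>
        if ab.2 - ab.1 == 2 then result.set (ab.1 + 1).toNat true else result) lst

-- ===== PRECONDITION & SPEC =====
def Spec_fill_mid_falses (lst : List Bool) (out : List Bool) : Prop := out = fill_mid_falses_alt lst
instance (lst : List Bool) (out : List Bool) : Decidable (Spec_fill_mid_falses lst out) := by unfold Spec_fill_mid_falses; infer_instance

-- ===== CLAIM (what is proved, stated in full; the proofs are below) =====
def Claim_equal_fill_mid_falses : Prop := ∀ (lst : List Bool), Dom_fill_mid_falses lst → Spec_fill_mid_falses lst (fill_mid_falses lst)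

-- ===== LEMMAS AND PROOFS =====

/-- A fold that sets position `f x` to `true` whenever `p x`, described pointwise. -/
theorem foldl_set_any {α : Type} (p : α → Bool) (f : α → Nat) :
    ∀ (L : List α) (r : List Bool) (j : Nat),
      (L.foldl (fun result x => if p x then result.set (f x) true else result) r)[j]?
        = r[j]?.map (fun v => v || L.any (fun x => p x && f x == j)) := by
  intro L
  induction L with
  | nil => intro r j; cases h : r[j]? <;> simp [h]
  | cons x L ih =>
    intro r j
    simp only [List.foldl_cons, List.any_cons]
    by_cases hp : p x
    · rw [if_pos hp, ih, List.getElem?_set]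
      by_cases hj : f x = j
      · rw [if_pos hj]
        subst hj
        by_cases hl : f x < r.length
        · rw [if_pos hl, List.getElem?_eq_getElem hl]
          simp [hp]
        · rw [if_neg hl, List.getElem?_eq_none (by omega)]
          simp
      · rw [if_neg hj]
        have : (f x == j) = false := by simp [hj]
        simp [this]
    · rw [if_neg hp]
      have hp' : p x = false := by revert hp; cases p x <;> simp
      rw [ih]
      simp [hp']

/-- Forward adjacency: a pair of `L.zip L.tail` in a strictly sorted list is two members
with nothing of `L` strictly between them. -/
theorem zip_tail_elim :
    ∀ {L : List Int}, L.Pairwise (· < ·) → ∀ {a b : Int}, (a, b) ∈ L.zip L.tail →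
      a ∈ L ∧ b ∈ L ∧ a < b ∧ ∀ c ∈ L, ¬(a < c ∧ c < b) := by
  intro L
  induction L with
  | nil => intro _ a b h; simp at h
  | cons x M ih =>
    intro hP a b h
    cases M with
    | nil => simp at h
    | cons y L'' =>
      have hP' : (y :: L'').Pairwise (· < ·) := hP.of_cons
      have hx : ∀ c ∈ y :: L'', x < c := fun c hc => (List.pairwise_cons.mp hP).1 c hc
      simp only [List.tail_cons, List.zip_cons_cons, List.mem_cons] at h
      rcases h with ⟨rfl, rfl⟩ | h
      · refine ⟨List.mem_cons_self, List.mem_cons_of_mem _ List.mem_cons_self,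
            hx _ List.mem_cons_self, ?_⟩
        intro c hc ⟨hac, hcb⟩
        rcases List.mem_cons.mp hc with rfl | hc
        · omega
        · rcases List.mem_cons.mp hc with rfl | hc
          · omega
          · exact absurd hcb (by have := (List.pairwise_cons.mp hP').1 c hc; omega)
      · have h' : (a, b) ∈ (y :: L'').zip (y :: L'').tail := by simpa using h
        obtain ⟨ha, hb, hab, hbet⟩ := ih hP' h'
        refine ⟨List.mem_cons_of_mem _ ha, List.mem_cons_of_mem _ hb, hab, ?_⟩
        intro c hc hcc
        rcases List.mem_cons.mp hc with rfl | hc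
        · have := hx a ha; omega
        · exact hbet c hc hcc

/-- Backward adjacency: in a strictly sorted list, two members with nothing of `L`
strictly between them form a pair of `L.zip L.tail`. -/
theorem zip_tail_intro :
    ∀ {L : List Int}, L.Pairwise (· < ·) → ∀ {a b : Int}, a ∈ L → b ∈ L → a < b →
      (∀ c ∈ L, ¬(a < c ∧ c < b)) → (a, b) ∈ L.zip L.tail := by
  intro L
  induction L with
  | nil => intro _ a b h; simp at h
  | cons x M ih =>
    intro hP a b ha hb hab hbet
    have hx : ∀ c ∈ M, x < c := fun c hc => (List.pairwise_cons.mp hP).1 c hc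
    rcases List.mem_cons.mp ha with rfl | haM
    · -- a = x is the head
      have hbM : b ∈ M := by
        rcases List.mem_cons.mp hb with rfl | h
        · omega
        · exact h
      cases M with
      | nil => simp at hbM
      | cons y L'' =>
        have hby : b = y := by
          rcases List.mem_cons.mp hbM with rfl | hbL
          · rfl
          · have h1 : a < y := hx y List.mem_cons_self
            have h2 : y < b := (List.pairwise_cons.mp hP.of_cons).1 b hbL
            exact absurd ⟨h1, h2⟩ (hbet y (List.mem_cons_of_mem _ List.mem_cons_self))
        subst hby
        simp
    · -- a is in the tail
      have hbM : b ∈ M := by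
        rcases List.mem_cons.mp hb with rfl | h
        · have := hx a haM; omega
        · exact h
      cases M with
      | nil => simp at haM
      | cons y L'' =>
        have h' := ih hP.of_cons haM hbM hab
          (fun c hc => hbet c (List.mem_cons_of_mem _ hc))
        simp only [List.tail_cons] at h' ⊢
        rw [List.zip_cons_cons]
        exact List.mem_cons_of_mem _ h'

/-- Membership in the collected index list. -/
theorem mem_pyTrues {lst : List Bool} {a : Int} :
    a ∈ pyTrues lst ↔
      ∃ (k : Nat), k < lst.length ∧ a = (k : Int) ∧ lst.getD k false = true := by
  unfold pyTrues
  simp only [List.mem_map, List.mem_filter, PySem.List.mem_enumerate_iff]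
  constructor
  · rintro ⟨p, ⟨⟨k, hk, rfl⟩, hv⟩, rfl⟩
    refine ⟨k, hk, by simp, ?_⟩
    rw [List.getD_eq_getElem?_getD, List.getElem?_eq_getElem hk]
    simpa using hv
  · rintro ⟨k, hk, rfl, hv⟩
    rw [List.getD_eq_getElem?_getD, List.getElem?_eq_getElem hk] at hv
    exact ⟨((k : Int), lst[k]), ⟨⟨k, hk, by simp⟩, by simpa using hv⟩, rfl⟩

/-- The collected index list is strictly sorted. -/
theorem pairwise_pyTrues (lst : List Bool) : (pyTrues lst).Pairwise (· < ·) := by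
  unfold pyTrues
  rw [List.pairwise_map]
  exact (PySem.List.pairwise_lt_enumerate lst 0).filter _

-- ===== VERDICT (by name: the statement is the Claim_ definition above) =====
theorem fill_mid_falses_spec : Claim_equal_fill_mid_falses := by
  intro lst _
  unfold Spec_fill_mid_falses fill_mid_falses fill_mid_falses_alt
  by_cases h3 : lst.length < 3
  · simp [h3]
  · rw [if_neg h3, if_neg h3]
    have hn : 3 ≤ lst.length := by omega
    apply List.ext_getElem?
    intro j
    rw [foldl_set_any (fun i => !(lst.getD i false) && lst.getD (i - 1) false
          && lst.getD (i + 1) false) (fun i => i),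
        foldl_set_any (fun ab : Int × Int => ab.2 - ab.1 == 2)
          (fun ab : Int × Int => (ab.1 + 1).toNat)]
    by_cases hj : j < lst.length
    swap
    · rw [List.getElem?_eq_none (by omega)]
      simp
    · congr 1
      funext v
      congr 1
      rw [Bool.eq_iff_iff, List.any_eq_true, List.any_eq_true]
      constructor
      · rintro ⟨i, hiR, hcond⟩
        rw [List.mem_range'_1] at hiR
        simp only [Bool.and_eq_true, beq_iff_eq, Bool.not_eq_eq_eq_not, Bool.not_true] at hcond
        obtain ⟨⟨⟨hci, hcm⟩, hcp⟩, rfl⟩ := hcond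
        have h1 : 1 ≤ i := hiR.1
        have h2 : i + 1 < lst.length := by omega
        refine ⟨((i : Int) - 1, (i : Int) + 1), ?_, ?_⟩
        · rw [List.drop_one]
          refine zip_tail_intro (pairwise_pyTrues lst) ?_ ?_ (by omega) ?_
          · rw [mem_pyTrues]
            exact ⟨i - 1, by omega, by omega, hcm⟩
          · rw [mem_pyTrues]
            exact ⟨i + 1, by omega, by omega, hcp⟩
          · rintro c hc ⟨hac, hcb⟩
            rw [mem_pyTrues] at hc
            obtain ⟨k, hk, rfl, hv⟩ := hc
            have hki : k = i := by omega
            subst hki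
            rw [hci] at hv
            exact absurd hv (by simp)
        · simp only [Bool.and_eq_true, beq_iff_eq]
          exact ⟨by omega, by omega⟩
      · rintro ⟨⟨a, b⟩, hzip, hcond⟩
        simp only [Bool.and_eq_true, beq_iff_eq] at hcond
        obtain ⟨hd2, hfj⟩ := hcond
        rw [List.drop_one] at hzip
        obtain ⟨haT, hbT, hab, hbet⟩ := zip_tail_elim (pairwise_pyTrues lst) hzip
        rw [mem_pyTrues] at haT hbT
        obtain ⟨ka, hka, rfl, hva⟩ := haT
        obtain ⟨kb, hkb, hbk, hvb⟩ := hbT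
        have hkb2 : kb = ka + 2 := by omega
        have hj' : j = ka + 1 := by omega
        subst hj'
        have hmidF : lst.getD (ka + 1) false = false := by
          by_contra hmt
          have hmt' : lst.getD (ka + 1) false = true := by
            revert hmt; cases lst.getD (ka + 1) false <;> simp
          have hmem : ((ka : Int) + 1) ∈ pyTrues lst := by
            rw [mem_pyTrues]; exact ⟨ka + 1, by omega, by push_cast; ring, hmt'⟩
          exact hbet _ hmem ⟨by omega, by omega⟩
        refine ⟨ka + 1, ?_, ?_⟩
        · rw [List.mem_range'_1]; omega
        · simp only [Bool.and_eq_true, beq_iff_eq, Bool.not_eq_eq_eq_not, Bool.not_true]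
          refine ⟨⟨⟨?_, ?_⟩, ?_⟩, by simp⟩
          · exact hmidF
          · rw [Nat.add_sub_cancel]; exact hva
          · rw [show ka + 1 + 1 = kb by omega]; exact hvb
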